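-- pv_equiv track=rewrite | github.com/wilsone24/Bot-TelegramApi | RRLNHCCC.py | encontrar_k
-- ===== SOURCE A (Python) =====
-- def encontrar_k(ecuacion): #Extraido de ChatGPT
--     k = 0  # Inicializar k en cero
--     idx = ecuacion.find('f(n-')  # Buscar la primera aparición de 'f(n-'
--     while idx != -1:  # Mientras haya más apariciones
--         idx += 4  # Saltar los caracteres 'f(n-'
--         numero = ''  # Inicializar una cadena vacía para el número
--         while idx < len(ecuacion) and ecuacion[idx].isdigit():  # Buscar dígitos después de 'f(n-'
--             numero += ecuacion[idx]  # Concatenar el dígito a la cadena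
--             idx += 1  # Avanzar el índice
--         if numero:  # Si se encontró un número
--             k = max(k, int(numero))  # Actualizar k si es mayor que el valor actual
--         idx = ecuacion.find('f(n-', idx)  # Buscar la siguiente aparición de 'f(n-' a partir del índice actual
--     return k  # Devolver el valor máximo de k encontrado
-- ===== SOURCE B (Python) =====
-- def encontrar_k(ecuacion):
--     valores = [0]
--     for parte in ecuacion.split('f(n-')[1:]:
--         numero = parte[:len(parte) - len(parte.lstrip('0123456789'))]
--         if numero:
--             valores.append(int(numero))
--     return max(valores)
-- ===== Notes on version B (the rewrite author's own statement) =====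
-- stated objective: alternative
-- what changed: A hand-walks the string with repeated find() jumps and an inner per-character digit loop keeping a running max; B splits the string once on the delimiter 'f(n-', computes each piece's leading digit run arithmetically via lstrip (no character loop), collects the numbers into a list seeded with 0 and takes one final max.
import Mathlib
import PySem

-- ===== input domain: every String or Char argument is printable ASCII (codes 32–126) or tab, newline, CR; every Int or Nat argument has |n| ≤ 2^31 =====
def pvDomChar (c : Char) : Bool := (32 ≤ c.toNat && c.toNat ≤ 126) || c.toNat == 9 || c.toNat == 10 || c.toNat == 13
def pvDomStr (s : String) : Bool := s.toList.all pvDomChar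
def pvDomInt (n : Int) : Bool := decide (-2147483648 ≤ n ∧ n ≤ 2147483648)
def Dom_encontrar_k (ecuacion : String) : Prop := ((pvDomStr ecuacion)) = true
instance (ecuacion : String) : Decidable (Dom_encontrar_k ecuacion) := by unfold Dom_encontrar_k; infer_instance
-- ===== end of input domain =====

-- B replaces A's repeated find() walk with its inner per-character digit loop by one split on
-- the delimiter 'f(n-', an arithmetic lstrip-based extraction of each piece's leading digit run,
-- and a single final max over the collected numbers (objective: alternative).

-- shared helper: int(s) — exact for the nonempty all-ASCII-digit strings both programs feed it
def digitsToInt (ds : List Char) : Int :=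
  ((ds.foldl (fun a c => a * 10 + (c.toNat - 48)) 0 : Nat) : Int)

def pvPat : List Char := ['f', '(', 'n', '-']

-- ===== PORT A =====
-- A's inner while: collect the digit characters of ecuacion from index i on
def pvCollect (l : List Char) (i : Nat) : List Char :=
  if h : i < l.length then
    if PySem.Chars.isdigit l[i] then l[i] :: pvCollect l (i + 1) else []
  else []
termination_by l.length - i

-- needed by pvSearchA to maintain its bound argument
theorem pvCollect_length (l : List Char) (i : Nat) : (pvCollect l i).length ≤ l.length - i := by
  rw [pvCollect]
  split
  · split
    · have := pvCollect_length l (i + 1)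
      simp only [List.length_cons]
      omega
    · simp
  · simp
termination_by l.length - i

-- A's outer while loop: k is the running max, start the index the next find starts from;
-- the bound fact it needs to recurse:
theorem pvFind_bounds (l : List Char) (start : Nat) (hs : start ≤ l.length)
    (hf : PySem.Chars.findFrom l pvPat (start : Int) none ≠ -1) :
    start ≤ (PySem.Chars.findFrom l pvPat (start : Int) none).toNat ∧
      (PySem.Chars.findFrom l pvPat (start : Int) none).toNat + 4 +
        (pvCollect l ((PySem.Chars.findFrom l pvPat (start : Int) none).toNat + 4)).length
        ≤ l.length := by
  have spec := PySem.Chars.findFrom_natCast_spec l pvPat start hs hf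
  have h0 : (start : Int) ≤ PySem.Chars.findFrom l pvPat (start : Int) none := spec.1
  obtain ⟨u, hu⟩ := spec.2.1
  have hlen := congrArg List.length hu
  rw [List.length_append, List.length_drop, show pvPat.length = 4 from rfl] at hlen
  have hcl := pvCollect_length l ((PySem.Chars.findFrom l pvPat (start : Int) none).toNat + 4)
  omega

def pvSearchA (l : List Char) (k : Int) (start : Nat) (hs : start ≤ l.length) : Int :=
  if hf : PySem.Chars.findFrom l pvPat (start : Int) none = -1 then k
  else
    have hb := pvFind_bounds l start hs hf
    pvSearchA l
      (if (pvCollect l ((PySem.Chars.findFrom l pvPat (start : Int) none).toNat + 4)).isEmpty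
       then k
       else max k (digitsToInt
         (pvCollect l ((PySem.Chars.findFrom l pvPat (start : Int) none).toNat + 4))))
      ((PySem.Chars.findFrom l pvPat (start : Int) none).toNat + 4 +
        (pvCollect l ((PySem.Chars.findFrom l pvPat (start : Int) none).toNat + 4)).length)
      hb.2
termination_by l.length - start
decreasing_by omega

def encontrar_k (ecuacion : String) : Int :=
  pvSearchA ecuacion.toList 0 0 (Nat.zero_le _)

-- ===== PORT B =====
def pvDigitChars : List Char := ['0', '1', '2', '3', '4', '5', '6', '7', '8', '9']

def encontrar_k_alt (ecuacion : String) : Int :=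
  -- ecuacion.split('f(n-'); the [1:] slice with nonnegative in-range start is List.drop 1 (exact)
  let partes := (PySem.Chars.splitOn ecuacion.toList pvPat).drop 1
  -- the for-loop appending to valores = [0]
  let valores := partes.foldl
    (fun vs parte =>
      -- parte.lstrip('0123456789') drops exactly the leading chars of that set (exact);
      -- numero = parte[:len(parte) - len(resto)], a take with a nonnegative in-range bound
      let numero := parte.take
        (parte.length - (parte.dropWhile (fun c => pvDigitChars.contains c)).length)
      if numero.isEmpty then vs else vs ++ [digitsToInt numero])
    [(0 : Int)]
  -- max(valores): valores always contains 0, so max? is some and the getD default is unreachable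
  (PySem.List.max? valores (fun x => x)).getD 0

-- ===== PRECONDITION & SPEC =====
def Spec_encontrar_k (ecuacion : String) (out : Int) : Prop := out = encontrar_k_alt ecuacion
instance (ecuacion : String) (out : Int) : Decidable (Spec_encontrar_k ecuacion out) := by unfold Spec_encontrar_k; infer_instance

-- ===== CLAIM (what is proved, stated in full; the proofs are below) =====
def Claim_equal_encontrar_k : Prop := ∀ (ecuacion : String), Dom_encontrar_k ecuacion → Spec_encontrar_k ecuacion (encontrar_k ecuacion)

-- ===== LEMMAS AND PROOFS =====

-- the maximal digit prefix of a char list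
def pvDigits : List Char → List Char
  | [] => []
  | c :: t => if PySem.Chars.isdigit c then c :: pvDigits t else []

-- the numbers ('' skipped) extracted by A read off position by position:
def pvScanB (l : List Char) (i : Nat) : List Int :=
  if _h : i < l.length then
    if pvPat.isPrefixOf (l.drop i) then
      if (pvDigits (l.drop (i + 4))).isEmpty then pvScanB l (i + 1)
      else digitsToInt (pvDigits (l.drop (i + 4))) :: pvScanB l (i + 1)
    else pvScanB l (i + 1)
  else []
termination_by l.length - i

theorem pvDigits_prefix (l : List Char) : pvDigits l <+: l := by
  induction l with
  | nil => simp [pvDigits]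
  | cons c t ih =>
    simp only [pvDigits]
    split
    · exact (List.cons_prefix_cons).2 ⟨rfl, ih⟩
    · exact List.nil_prefix

theorem pvDigits_mem {l : List Char} {c : Char} (h : c ∈ pvDigits l) :
    PySem.Chars.isdigit c = true := by
  induction l with
  | nil => simp [pvDigits] at h
  | cons a t ih =>
    simp only [pvDigits] at h
    split at h
    · rcases List.mem_cons.1 h with h | h
      · subst h; assumption
      · exact ih h
    · simp at h

theorem pvCollect_eq (l : List Char) (i : Nat) : pvCollect l i = pvDigits (l.drop i) := by
  rw [pvCollect]
  split
  · rename_i h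
    rw [List.drop_eq_getElem_cons h]
    simp only [pvDigits]
    split
    · rw [pvCollect_eq l (i + 1)]
    · rfl
  · rename_i h
    rw [List.drop_eq_nil_iff.2 (by omega)]
    rfl
termination_by l.length - i

-- a prefix of some drop is an infix
theorem prefix_drop_infix {pat t : List Char} {m : Nat} (h : pat <+: t.drop m) :
    pat <:+: t := by
  obtain ⟨u, hu⟩ := h
  exact ⟨t.take m, u, by rw [List.append_assoc, hu, List.take_append_drop]⟩

theorem scan_out (l : List Char) {s : Nat} (h : l.length ≤ s) : pvScanB l s = [] := by
  rw [pvScanB]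
  simp [Nat.not_lt.2 h]

theorem scan_step (l : List Char) {s : Nat} (h : ¬ pvPat <+: l.drop s) :
    pvScanB l s = pvScanB l (s + 1) := by
  by_cases hs : s < l.length
  · rw [pvScanB]
    simp only [hs, dite_true]
    rw [if_neg (by simpa [List.isPrefixOf_iff_prefix] using h)]
  · rw [scan_out l (by omega), scan_out l (by omega)]

theorem scan_congr (l : List Char) : ∀ (d s : Nat),
    (∀ j, s ≤ j → j < s + d → ¬ pvPat <+: l.drop j) → pvScanB l s = pvScanB l (s + d) := by
  intro d
  induction d with
  | zero => intro s _; rfl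
  | succ d ih =>
    intro s h
    rw [scan_step l (h s le_rfl (by omega)), ih (s + 1) (fun j h1 h2 => h j (by omega) (by omega))]
    congr 1
    omega

theorem scan_none (l : List Char) {s : Nat} (h : ∀ j, s ≤ j → ¬ pvPat <+: l.drop j) :
    pvScanB l s = [] := by
  rw [scan_congr l (l.length - s) s (fun j h1 _ => h j h1), scan_out l (by omega)]

-- at a match position m, no further match starts inside the pattern or inside its digit run
theorem no_match_inside (l : List Char) (m : Nat) (hpre : pvPat <+: l.drop m) :
    ∀ j, m + 1 ≤ j → j < m + 4 + (pvDigits (l.drop (m + 4))).length →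
      ¬ pvPat <+: l.drop j := by
  intro j hj1 hj2 hp
  obtain ⟨u, hu⟩ := hpre
  have hu4 : u = l.drop (m + 4) := by
    have := congrArg (List.drop 4) hu
    simpa [List.drop_drop, pvPat] using this
  have hlen := congrArg List.length hu
  rw [List.length_append, List.length_drop, show pvPat.length = 4 from rfl] at hlen
  have hmlen : m + 4 ≤ l.length := by omega
  have hjlen : j < l.length := by
    obtain ⟨v, hv⟩ := hp
    have hv' := congrArg List.length hv
    rw [List.length_append, List.length_drop, show pvPat.length = 4 from rfl] at hv'
    omega
  have hjf : l[j] = 'f' := by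
    rw [List.drop_eq_getElem_cons hjlen] at hp
    exact ((List.cons_prefix_cons.1 hp).1).symm
  have hget : ∀ (r : Nat) (hr : r < 4 + u.length),
      (l.drop m)[r]'(by rw [List.length_drop]; omega) = l[m + r]'(by omega) :=
    fun r hr => List.getElem_drop
  by_cases hcase : j ≤ m + 3
  · have h3 : j = m + 1 ∨ j = m + 2 ∨ j = m + 3 := by omega
    rcases h3 with h3 | h3 | h3 <;> subst h3
    · have hx := List.getElem_of_eq hu.symm
        (show (1 : Nat) < (l.drop m).length by rw [List.length_drop]; omega)
      rw [hget 1 (by omega)] at hx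
      have h1 : l[m + 1]'(by omega) = '(' := hx.trans (by rfl)
      exact absurd (hjf.symm.trans h1) (by decide)
    · have hx := List.getElem_of_eq hu.symm
        (show (2 : Nat) < (l.drop m).length by rw [List.length_drop]; omega)
      rw [hget 2 (by omega)] at hx
      have h1 : l[m + 2]'(by omega) = 'n' := hx.trans (by rfl)
      exact absurd (hjf.symm.trans h1) (by decide)
    · have hx := List.getElem_of_eq hu.symm
        (show (3 : Nat) < (l.drop m).length by rw [List.length_drop]; omega)
      rw [hget 3 (by omega)] at hx
      have h1 : l[m + 3]'(by omega) = '-' := hx.trans (by rfl)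
      exact absurd (hjf.symm.trans h1) (by decide)
  · have hr : j - (m + 4) < (pvDigits (l.drop (m + 4))).length := by omega
    have hpref := pvDigits_prefix (l.drop (m + 4))
    have hrd : j - (m + 4) < (l.drop (m + 4)).length := by
      have := hpref.length_le; omega
    have h1 : (pvDigits (l.drop (m + 4)))[j - (m + 4)] = (l.drop (m + 4))[j - (m + 4)]'hrd :=
      hpref.getElem hr
    have h2 : (l.drop (m + 4))[j - (m + 4)]'hrd = l[j]'hjlen := by
      rw [List.getElem_drop]
      congr 1
      omega
    have hdig : PySem.Chars.isdigit ((pvDigits (l.drop (m + 4)))[j - (m + 4)]) = true :=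
      pvDigits_mem (List.getElem_mem hr)
    rw [h1, h2, hjf] at hdig
    simp [PySem.Chars.isdigit] at hdig

theorem searchA_eq (l : List Char) : ∀ (n s : Nat) (hs : s ≤ l.length) (k : Int),
    l.length - s ≤ n → pvSearchA l k s hs = List.foldl max k (pvScanB l s) := by
  intro n
  induction n with
  | zero =>
    intro s hs k hn
    have hsl : s = l.length := by omega
    rw [pvSearchA]
    have hf : PySem.Chars.findFrom l pvPat (s : Int) none = -1 := by
      rw [PySem.Chars.findFrom_natCast_eq_neg_one_iff l pvPat s hs]
      subst hsl
      simp [pvPat]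
    rw [dif_pos hf, scan_out l (by omega)]
    rfl
  | succ n ih =>
    intro s hs k hn
    rw [pvSearchA]
    split
    · rename_i hf
      rw [scan_none l (fun j hj hp => by
        have : pvPat <:+: l.drop s := by
          have h1 : l.drop j = (l.drop s).drop (j - s) := by rw [List.drop_drop]; congr 1; omega
          rw [h1] at hp
          exact prefix_drop_infix hp
        exact ((PySem.Chars.findFrom_natCast_eq_neg_one_iff l pvPat s hs).1 hf) this)]
      rfl
    · rename_i hf
      have spec := PySem.Chars.findFrom_natCast_spec l pvPat s hs hf
      have hb := pvFind_bounds l s hs hf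
      set f := PySem.Chars.findFrom l pvPat (s : Int) none with hfdef
      have hsf : s ≤ f.toNat := hb.1
      have hpre := spec.2.1
      have hmin := spec.2.2
      have hle := hb.2
      have hflt : f.toNat < l.length := by omega
      have hcoll : pvCollect l (f.toNat + 4) = pvDigits (l.drop (f.toNat + 4)) :=
        pvCollect_eq l (f.toNat + 4)
      have hskip1 : pvScanB l s = pvScanB l f.toNat := by
        have h := scan_congr l (f.toNat - s) s (fun j h1 h2 => hmin j h1 (by omega))
        rwa [show s + (f.toNat - s) = f.toNat by omega] at h
      have hskip2 : pvScanB l (f.toNat + 1) =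
          pvScanB l (f.toNat + 4 + (pvCollect l (f.toNat + 4)).length) := by
        rw [hcoll]
        have h := scan_congr l (3 + (pvDigits (l.drop (f.toNat + 4))).length) (f.toNat + 1)
          (fun j h1 h2 => no_match_inside l f.toNat hpre j h1 (by omega))
        rwa [show f.toNat + 1 + (3 + (pvDigits (l.drop (f.toNat + 4))).length)
          = f.toNat + 4 + (pvDigits (l.drop (f.toNat + 4))).length by omega] at h
      have hscan : pvScanB l f.toNat =
          (if (pvCollect l (f.toNat + 4)).isEmpty then pvScanB l (f.toNat + 1)
           else digitsToInt (pvCollect l (f.toNat + 4)) :: pvScanB l (f.toNat + 1)) := by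
        rw [pvScanB, dif_pos hflt, if_pos (List.isPrefixOf_iff_prefix.2 hpre), hcoll]
      rw [hskip1, hscan]
      by_cases hemp : (pvCollect l (f.toNat + 4)).isEmpty = true
      · rw [if_pos hemp, if_pos hemp, hskip2]
        exact ih (f.toNat + 4 + (pvCollect l (f.toNat + 4)).length) (by omega) k (by omega)
      · rw [if_neg hemp, if_neg hemp, hskip2, List.foldl_cons]
        exact ih (f.toNat + 4 + (pvCollect l (f.toNat + 4)).length) (by omega) _ (by omega)

-- ===== B-side lemmas =====

theorem charLeNat (a b : Char) : (a ≤ b) ↔ a.toNat ≤ b.toNat := by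
  rw [Char.le_def, UInt32.le_iff_toNat_le]; rfl

theorem charEqNat (a b : Char) : a = b ↔ a.toNat = b.toNat := by
  constructor
  · intro h; rw [h]
  · intro h
    apply Char.ext
    exact UInt32.toNat.inj h

-- B's lstrip character set tests exactly Python's isdigit on every Char
theorem contains_eq_isdigit (c : Char) : pvDigitChars.contains c = PySem.Chars.isdigit c := by
  apply Bool.eq_iff_iff.2
  simp only [pvDigitChars, PySem.Chars.isdigit, List.contains_eq_mem, decide_eq_true_eq,
    List.mem_cons, List.not_mem_nil, or_false, Bool.and_eq_true,
    charLeNat, charEqNat,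
    show ('0').toNat = 48 from rfl, show ('1').toNat = 49 from rfl,
    show ('2').toNat = 50 from rfl, show ('3').toNat = 51 from rfl,
    show ('4').toNat = 52 from rfl, show ('5').toNat = 53 from rfl,
    show ('6').toNat = 54 from rfl, show ('7').toNat = 55 from rfl,
    show ('8').toNat = 56 from rfl, show ('9').toNat = 57 from rfl]
  omega

-- B's arithmetic digit extraction is the maximal digit prefix
theorem pvDigits_eq_takeWhile (l : List Char) : pvDigits l = l.takeWhile PySem.Chars.isdigit := by
  induction l with
  | nil => rfl
  | cons c t ih =>
    simp only [pvDigits, List.takeWhile_cons]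
    split <;> rename_i h <;> simp [ih]

-- B's arithmetic digit extraction is the maximal digit prefix
theorem numero_eq (p : List Char) :
    p.take (p.length - (p.dropWhile (fun c => pvDigitChars.contains c)).length) = pvDigits p := by
  have hfun : (fun c => pvDigitChars.contains c) = PySem.Chars.isdigit := by
    funext c; exact contains_eq_isdigit c
  rw [hfun, pvDigits_eq_takeWhile]
  have hsum : (p.takeWhile PySem.Chars.isdigit).length
      + (p.dropWhile PySem.Chars.isdigit).length = p.length := by
    rw [← List.length_append, List.takeWhile_append_dropWhile]
  have hpre : p.takeWhile PySem.Chars.isdigit <+: p := List.takeWhile_prefix _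
  rw [show p.length - (p.dropWhile PySem.Chars.isdigit).length
      = (p.takeWhile PySem.Chars.isdigit).length by omega]
  exact (List.prefix_iff_eq_take.1 hpre).symm

-- scanning a suffix
theorem scan_drop (l : List Char) (c : Nat) (i : Nat) :
    pvScanB l (c + i) = pvScanB (l.drop c) i := by
  have hlen : (l.drop c).length = l.length - c := List.length_drop
  have hd1 : l.drop (c + i) = (l.drop c).drop i := by
    rw [List.drop_drop]
  have hd2 : l.drop (c + i + 4) = (l.drop c).drop (i + 4) := by
    rw [List.drop_drop, Nat.add_assoc]
  rw [pvScanB]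
  conv_rhs => rw [pvScanB]
  by_cases h : c + i < l.length
  · rw [dif_pos h, dif_pos (show i < (l.drop c).length by omega), hd1, hd2,
      show c + i + 1 = c + (i + 1) by omega, scan_drop l c (i + 1)]
  · rw [dif_neg h, dif_neg (show ¬ i < (l.drop c).length by omega)]
termination_by l.length - (c + i)

-- no match starts inside a digit run
theorem digit_no_match (r : List Char) (j : Nat) (hj : j < (pvDigits r).length) :
    ¬ pvPat <+: r.drop j := by
  intro hp
  have hpre := pvDigits_prefix r
  have hjr : j < r.length := by
    have := hpre.length_le
    omega
  have h1 : (pvDigits r)[j] = r[j]'hjr := hpre.getElem hj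
  have hdig : PySem.Chars.isdigit ((pvDigits r)[j]) = true := pvDigits_mem (List.getElem_mem hj)
  rw [List.drop_eq_getElem_cons hjr] at hp
  have hf : r[j]'hjr = 'f' := ((List.cons_prefix_cons.1 hp).1).symm
  rw [h1, hf] at hdig
  simp [PySem.Chars.isdigit] at hdig

-- clean recursive model of str.split('f(n-')
def pvMySplit : List Char → List (List Char)
  | [] => [[]]
  | c :: rest =>
    if pvPat.isPrefixOf (c :: rest) then [] :: pvMySplit (rest.drop 3)
    else (pvMySplit rest).modifyHead (c :: ·)
termination_by l => l.length
decreasing_by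
  · simp only [List.length_cons]
    have : (rest.drop 3).length = rest.length - 3 := List.length_drop
    omega
  · simp

theorem mySplit_ne_nil (l : List Char) : pvMySplit l ≠ [] :=
  match l with
  | [] => by simp [pvMySplit]
  | c :: rest => by
    rw [pvMySplit]
    split
    · simp
    · rcases h : pvMySplit rest with _ | ⟨a, t⟩
      · exact absurd h (mySplit_ne_nil rest)
      · simp

theorem go_eq (fuel : Nat) : ∀ (l cur : List Char) (acc : List (List Char)), l.length < fuel →
    PySem.Chars.splitOn.go pvPat fuel l cur acc
      = acc.reverse ++ List.modifyHead (fun x => cur.reverse ++ x) (pvMySplit l) := by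
  induction fuel with
  | zero => intro l cur acc h; omega
  | succ fuel ih =>
    intro l cur acc h
    rw [PySem.Chars.splitOn.go.eq_def]
    cases l with
    | nil => simp [pvMySplit]
    | cons c rest =>
      simp only []
      by_cases hp : pvPat.isPrefixOf (c :: rest) = true
      · rw [if_pos hp]
        have hdrop : List.drop pvPat.length (c :: rest) = rest.drop 3 := by
          simp [pvPat]
        rw [hdrop, ih (rest.drop 3) [] (cur.reverse :: acc)
          (by have : (rest.drop 3).length = rest.length - 3 := List.length_drop
              simp at h ⊢; omega)]
        rw [pvMySplit, if_pos hp]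
        simp
        cases pvMySplit (rest.drop 3) <;> simp
      · rw [if_neg hp, ih rest (c :: cur) acc (by simp at h; omega)]
        rw [pvMySplit, if_neg hp, List.modifyHead_modifyHead]
        congr 1
        congr 1
        funext x
        simp

theorem splitOn_eq (l : List Char) : PySem.Chars.splitOn l pvPat = pvMySplit l := by
  rw [PySem.Chars.splitOn, go_eq (l.length + 1) l [] [] (by omega)]
  cases pvMySplit l <;> simp

-- the numbers B collects from a list of pieces
def pvCollectParts : List (List Char) → List Int
  | [] => []
  | p :: t => if (pvDigits p).isEmpty then pvCollectParts t
              else digitsToInt (pvDigits p) :: pvCollectParts t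

theorem key (l : List Char) :
    pvDigits ((pvMySplit l).headI) = pvDigits l ∧
    pvCollectParts ((pvMySplit l).tail) = pvScanB l (pvDigits l).length :=
  match l with
  | [] => by
    have h1 : pvMySplit [] = [[]] := by rw [pvMySplit]
    rw [h1]
    constructor
    · rfl
    · rw [List.tail_cons, scan_out [] (by simp)]
      rfl
  | c :: rest => by
    rw [pvMySplit]
    by_cases hp : pvPat.isPrefixOf (c :: rest) = true
    · rw [if_pos hp]
      have hpre : pvPat <+: c :: rest := List.isPrefixOf_iff_prefix.1 hp
      have hc : c = 'f' := ((List.cons_prefix_cons.1 hpre).1).symm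
      have hdig0 : pvDigits (c :: rest) = [] := by
        rw [pvDigits, if_neg (by rw [hc]; decide)]
      have IH := key (rest.drop 3)
      constructor
      · rw [List.headI_cons, hdig0]
        rfl
      · rw [List.tail_cons, hdig0, List.length_nil]
        -- decompose pvMySplit (rest.drop 3) into head and tail
        have hne := mySplit_ne_nil (rest.drop 3)
        obtain ⟨h0, t0, hht⟩ : ∃ h0 t0, pvMySplit (rest.drop 3) = h0 :: t0 := by
          rcases hE : pvMySplit (rest.drop 3) with _ | ⟨a, b⟩
          · exact absurd hE hne
          · exact ⟨a, b, rfl⟩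
        rw [hht] at IH ⊢
        rw [List.headI_cons] at IH
        rw [List.tail_cons] at IH
        -- unfold the scan at the match position 0
        have h4 : (c :: rest).drop 4 = rest.drop 3 := by simp
        have hscan0 : pvScanB (c :: rest) 0 =
            (if (pvDigits (rest.drop 3)).isEmpty then pvScanB (c :: rest) 1
             else digitsToInt (pvDigits (rest.drop 3)) :: pvScanB (c :: rest) 1) := by
          rw [pvScanB, dif_pos (by simp), List.drop_zero, if_pos hp]
          rw [show (0 + 4 : Nat) = 4 from rfl, h4]
        have hskip : pvScanB (c :: rest) 1 =
            pvScanB (rest.drop 3) (pvDigits (rest.drop 3)).length := by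
          have hnm := no_match_inside (c :: rest) 0 (by simpa using hpre)
          have h := scan_congr (c :: rest) (3 + (pvDigits ((c :: rest).drop (0 + 4))).length) 1
            (fun j h1 h2 => hnm j (by omega) (by omega))
          rw [show (0 + 4 : Nat) = 4 from rfl, h4] at h
          rw [h, show (1 + (3 + (pvDigits (rest.drop 3)).length) : Nat)
            = 4 + (pvDigits (rest.drop 3)).length by omega,
            scan_drop (c :: rest) 4 (pvDigits (rest.drop 3)).length, h4]
        rw [hscan0, hskip, pvCollectParts, IH.1, IH.2]
    · rw [if_neg hp]
      have IH := key rest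
      have hne := mySplit_ne_nil rest
      obtain ⟨h0, t0, hht⟩ : ∃ h0 t0, pvMySplit rest = h0 :: t0 := by
        rcases hE : pvMySplit rest with _ | ⟨a, b⟩
        · exact absurd hE hne
        · exact ⟨a, b, rfl⟩
      rw [hht] at IH ⊢
      rw [List.headI_cons] at IH
      rw [List.tail_cons] at IH
      rw [List.modifyHead_cons, List.headI_cons, List.tail_cons]
      have hA : pvDigits (c :: h0) = pvDigits (c :: rest) := by
        rw [pvDigits, pvDigits, IH.1]
      refine ⟨hA, ?_⟩
      rw [IH.2]
      by_cases hd : PySem.Chars.isdigit c = true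
      · rw [show pvDigits (c :: rest) = c :: pvDigits rest by rw [pvDigits, if_pos hd],
          List.length_cons,
          show ((pvDigits rest).length + 1 : Nat) = 1 + (pvDigits rest).length by omega,
          scan_drop (c :: rest) 1 (pvDigits rest).length, List.drop_one, List.tail_cons]
      · rw [show pvDigits (c :: rest) = [] by rw [pvDigits, if_neg hd], List.length_nil]
        have hstep : pvScanB (c :: rest) 0 = pvScanB (c :: rest) 1 :=
          scan_step (c :: rest) (by
            rw [List.drop_zero]
            intro hpp
            exact hp (List.isPrefixOf_iff_prefix.2 hpp))
        rw [hstep, show (1 : Nat) = 1 + 0 from rfl, scan_drop (c :: rest) 1 0,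
          List.drop_one, List.tail_cons]
        rw [scan_congr rest (pvDigits rest).length 0
          (fun j h1 h2 => digit_no_match rest j (by omega)), Nat.zero_add]
  termination_by l.length
  decreasing_by
    · simp only [List.length_cons]
      have : (rest.drop 3).length = rest.length - 3 := List.length_drop
      omega
    · simp

theorem foldl_push_aux (xs : List (List Char)) : ∀ (init : List Int),
    xs.foldl
      (fun vs p => if (pvDigits p).isEmpty then vs else vs ++ [digitsToInt (pvDigits p)])
      init = init ++ pvCollectParts xs := by
  induction xs with
  | nil => intro init; simp [pvCollectParts]
  | cons p t ih =>
    intro init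
    rw [List.foldl_cons, pvCollectParts]
    by_cases h : (pvDigits p).isEmpty = true
    · rw [if_pos h, if_pos h, ih]
    · rw [if_neg h, if_neg h, ih, List.append_assoc, List.singleton_append]

theorem foldl_push (xs : List (List Char)) (init : List Int) :
    xs.foldl
      (fun vs parte =>
        let numero := parte.take
          (parte.length - (parte.dropWhile (fun c => pvDigitChars.contains c)).length)
        if numero.isEmpty then vs else vs ++ [digitsToInt numero])
      init = init ++ pvCollectParts xs := by
  have hf : (fun (vs : List Int) parte =>
        let numero := parte.take
          (parte.length - (parte.dropWhile (fun c => pvDigitChars.contains c)).length)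
        if numero.isEmpty then vs else vs ++ [digitsToInt numero])
      = fun vs p => if (pvDigits p).isEmpty then vs else vs ++ [digitsToInt (pvDigits p)] := by
    funext vs parte
    simp only [numero_eq]
  rw [hf, foldl_push_aux]

-- ===== VERDICT (by name: the statement is the Claim_ definition above) =====
theorem encontrar_k_spec : Claim_equal_encontrar_k := by
  intro e _
  unfold Spec_encontrar_k
  rw [encontrar_k,
    searchA_eq e.toList e.toList.length 0 (Nat.zero_le _) 0 (by omega)]
  unfold encontrar_k_alt
  simp only [splitOn_eq, List.drop_one, foldl_push, (key e.toList).2, List.singleton_append]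
  rw [show pvScanB e.toList (pvDigits e.toList).length = pvScanB e.toList 0 by
    rw [scan_congr e.toList (pvDigits e.toList).length 0
      (fun j h1 h2 => digit_no_match e.toList j (by omega)), Nat.zero_add]]
  rw [PySem.List.max?_id_cons, Option.getD_some]
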